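-- pv_equiv track=rewrite | github.com/gillham/C64 | C64OS/ptext/m2ptext.py | scan_codes
-- ===== SOURCE A (Python) =====
-- MTEXT_MIN = 0xE0
--
-- MTEXT_MAX = 0xF8
--
-- MTEXT = {
--     # link text / path delimiter
--     0x02: (str, " "),
--     # link end/stop marker
--     0x03: (str, ">"),
--     0xE0: (str, "<c:black>"),
--     0xE1: (str, "<c:white>"),
--     0xE2: (str, "<c:red>"),
--     0xE3: (str, "<c:cyan>"),
--     0xE4: (str, "<c:purple>"),
--     0xE5: (str, "<c:green>"),
--     0xE6: (str, "<c:blue>"),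
--     0xE7: (str, "<c:yellow>"),
--     0xE8: (str, "<c:orange>"),
--     0xE9: (str, "<c:brown>"),
--     0xEA: (str, "<c:light red>"),
--     0xEB: (str, "<c:dark gray>"),
--     0xEC: (str, "<c:medium gray>"),
--     0xED: (str, "<c:light green>"),
--     0xEE: (str, "<c:light blue>"),
--     0xEF: (str, "<c:light gray>"),
--     0xF0: (str, "<t:normal>"),
--     0xF1: (str, "<t:strong>"),
--     0xF2: (str, "<t:emphatic>"),
--     0xF3: (str, "<l:"),
--     0xF4: (str, "<j:left>"),
--     0xF5: (str, "<j:right>"),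
--     0xF6: (str, "<j:center>"),
--     0xF7: (str, "<j:full>"),
--     # horizontal rule
--     0xF8: (str, "<h:"),
-- }
--
-- PET_REMAP = {0xA4: "_", 0x0D: chr(0x0A)}
--
-- def pet2ascii(petscii):
--     """Convert PETSCII string to ASCII with some substitutions."""
--     ascii_string = ""
--     # based on the algorithm SD2IEC uses for FAT32 names.
--     for char in petscii:
--         if (128 + 64) < char < (128 + 91):
--             char -= 128
--         elif (96 - 32) < char < (123 - 32):
--             char += 32
--         elif (192 - 128) < char < (219 - 128):
--             char += 128
--         elif char == 255:
--             char = "~"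
--         # remap some special characters
--         if char in PET_REMAP:
--             char = ord(PET_REMAP[char])
--         ascii_string += chr(char)
--     return ascii_string
--
-- def scan_codes(binary):
--     """Scan petscii byte stream for MText codes."""
--     content = ""
--
--     # convert binary petscii to ascii
--     data = pet2ascii(binary)
--
--     for char in data:
--         byte = ord(char)
--         if (MTEXT_MIN <= byte <= MTEXT_MAX) or (1 < byte < 4):
--             if byte in MTEXT:
--                 funct = MTEXT.get(byte)[0]
--                 param = MTEXT.get(byte)[1]
--                 content += funct(param)
--         else:
--             content += char
--
--     return content
-- ===== SOURCE B (Python) =====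
-- _MTEXT_STR = {
--     0x02: " ", 0x03: ">",
--     0xE0: "<c:black>", 0xE1: "<c:white>", 0xE2: "<c:red>", 0xE3: "<c:cyan>",
--     0xE4: "<c:purple>", 0xE5: "<c:green>", 0xE6: "<c:blue>", 0xE7: "<c:yellow>",
--     0xE8: "<c:orange>", 0xE9: "<c:brown>", 0xEA: "<c:light red>",
--     0xEB: "<c:dark gray>", 0xEC: "<c:medium gray>", 0xED: "<c:light green>",
--     0xEE: "<c:light blue>", 0xEF: "<c:light gray>", 0xF0: "<t:normal>",
--     0xF1: "<t:strong>", 0xF2: "<t:emphatic>", 0xF3: "<l:", 0xF4: "<j:left>",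
--     0xF5: "<j:right>", 0xF6: "<j:center>", 0xF7: "<j:full>", 0xF8: "<h:",
-- }
--
-- def _entry(b):
--     """Fused pet2ascii + MText expansion for one byte value 0..255."""
--     if 193 <= b <= 218:
--         b -= 128
--     elif 65 <= b <= 90:
--         b += 32
--     if b == 0xA4:
--         b = 0x5F
--     elif b == 0x0D:
--         b = 0x0A
--     if b in _MTEXT_STR:
--         return _MTEXT_STR[b]
--     if 0xE0 <= b <= 0xF8 or 1 < b < 4:
--         return ""
--     return chr(b)
--
-- _TABLE = [_entry(b) for b in range(256)]
--
-- def scan_codes(binary):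
--     """Scan petscii byte stream for MText codes."""
--     return "".join(_TABLE[b] if 0 <= b < 256 else chr(b) for b in binary)
-- ===== Notes on version B (the rewrite author's own statement) =====
-- stated objective: simpler
-- what changed: Replaces A's two-pass decomposition (a pet2ascii string-building pass followed by a per-character branch/dict scan) with a single 256-entry table that fuses both stages, built once, so scan_codes becomes one ''.join pass over the bytes.
-- outside the precondition, e.g. on scan_codes([255]): A raises TypeError, B returns 'ÿ'
import Mathlib
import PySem

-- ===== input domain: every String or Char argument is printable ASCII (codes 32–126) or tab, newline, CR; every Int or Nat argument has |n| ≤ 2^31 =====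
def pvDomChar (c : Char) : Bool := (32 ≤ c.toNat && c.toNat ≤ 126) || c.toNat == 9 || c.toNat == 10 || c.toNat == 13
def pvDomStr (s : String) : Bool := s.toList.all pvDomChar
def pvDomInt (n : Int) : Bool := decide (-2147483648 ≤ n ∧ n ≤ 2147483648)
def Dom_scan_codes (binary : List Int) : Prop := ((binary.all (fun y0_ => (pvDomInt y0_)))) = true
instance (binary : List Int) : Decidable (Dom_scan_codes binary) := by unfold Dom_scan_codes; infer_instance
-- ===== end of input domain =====

-- B replaces A's two-pass pet2ascii-then-scan decomposition by a single 256-entry fused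
-- lookup table and one join pass (objective: simpler).

-- ===== PORT A =====
-- Python dict values are pairs (str, s); funct = str and str(s) = s, so the dict is ported
-- with the string payloads only.
def MTEXT : PySem.Dict Int String := PySem.Dict.ofList [
  (0x02, " "), (0x03, ">"),
  (0xE0, "<c:black>"), (0xE1, "<c:white>"), (0xE2, "<c:red>"), (0xE3, "<c:cyan>"),
  (0xE4, "<c:purple>"), (0xE5, "<c:green>"), (0xE6, "<c:blue>"), (0xE7, "<c:yellow>"),
  (0xE8, "<c:orange>"), (0xE9, "<c:brown>"), (0xEA, "<c:light red>"),
  (0xEB, "<c:dark gray>"), (0xEC, "<c:medium gray>"), (0xED, "<c:light green>"),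
  (0xEE, "<c:light blue>"), (0xEF, "<c:light gray>"), (0xF0, "<t:normal>"),
  (0xF1, "<t:strong>"), (0xF2, "<t:emphatic>"), (0xF3, "<l:"), (0xF4, "<j:left>"),
  (0xF5, "<j:right>"), (0xF6, "<j:center>"), (0xF7, "<j:full>"), (0xF8, "<h:")]

def PET_REMAP : PySem.Dict Int String := PySem.Dict.ofList [(0xA4, "_"), (0x0D, "\n")]

-- A's pet2ascii; the string is built as a List Char (exact: Python str of the same chars).
-- Python's `elif char == 255: char = "~"` makes the final chr(char) raise TypeError, and
-- chr raises ValueError for char < 0 or char ≥ 0x110000: all excluded by Pre_scan_codes,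
-- so the fallthrough below is never reached on admitted inputs.
def pet2ascii (petscii : List Int) : List Char :=
  petscii.foldl (fun ascii_string char =>
    let char : Int :=
      if 128 + 64 < char ∧ char < 128 + 91 then char - 128
      else if 96 - 32 < char ∧ char < 123 - 32 then char + 32
      else if 192 - 128 < char ∧ char < 219 - 128 then char + 128
      else char
    -- `if char in PET_REMAP: char = ord(PET_REMAP[char])` (values are 1-char strings)
    let char : Int :=
      match PET_REMAP.get? char with
      | some s => ((s.toList.headD ' ').toNat : Int)
      | none => char
    ascii_string ++ [Char.ofNat char.toNat]) []   -- chr(char): exact on Pre_ (valid scalars)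

def scan_codes (binary : List Int) : String :=
  let content : List Char := []
  let data := pet2ascii binary
  String.mk (data.foldl (fun content char =>
    let byte : Int := (char.toNat : Int)
    if (0xE0 ≤ byte ∧ byte ≤ 0xF8) ∨ (1 < byte ∧ byte < 4) then
      match MTEXT.get? byte with
      | some param => content ++ param.toList    -- content += funct(param), funct = str
      | none => content
    else content ++ [char]) content)

-- ===== PORT B =====
def MTEXT_STR_alt : PySem.Dict Int String := PySem.Dict.ofList [
  (0x02, " "), (0x03, ">"),
  (0xE0, "<c:black>"), (0xE1, "<c:white>"), (0xE2, "<c:red>"), (0xE3, "<c:cyan>"),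
  (0xE4, "<c:purple>"), (0xE5, "<c:green>"), (0xE6, "<c:blue>"), (0xE7, "<c:yellow>"),
  (0xE8, "<c:orange>"), (0xE9, "<c:brown>"), (0xEA, "<c:light red>"),
  (0xEB, "<c:dark gray>"), (0xEC, "<c:medium gray>"), (0xED, "<c:light green>"),
  (0xEE, "<c:light blue>"), (0xEF, "<c:light gray>"), (0xF0, "<t:normal>"),
  (0xF1, "<t:strong>"), (0xF2, "<t:emphatic>"), (0xF3, "<l:"), (0xF4, "<j:left>"),
  (0xF5, "<j:right>"), (0xF6, "<j:center>"), (0xF7, "<j:full>"), (0xF8, "<h:")]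

-- Source B's _entry: fused pet2ascii + MText expansion for one byte value 0..255
def entry_alt (b0 : Int) : List Char :=
  let b : Int :=
    if 193 ≤ b0 ∧ b0 ≤ 218 then b0 - 128
    else if 65 ≤ b0 ∧ b0 ≤ 90 then b0 + 32
    else b0
  let b : Int := if b = 0xA4 then 0x5F else if b = 0x0D then 0x0A else b
  match MTEXT_STR_alt.get? b with
  | some s => s.toList
  | none =>
    if (0xE0 ≤ b ∧ b ≤ 0xF8) ∨ (1 < b ∧ b < 4) then []
    else [Char.ofNat b.toNat]

-- Source B's _TABLE = [_entry(b) for b in range(256)]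
def TABLE_alt : List (List Char) := (List.range 256).map (fun b => entry_alt (b : Int))

-- ''.join(_TABLE[b] if 0 <= b < 256 else chr(b) for b in binary)
def scan_codes_alt (binary : List Int) : String :=
  String.mk ((binary.map (fun b =>
    if 0 ≤ b ∧ b < 256 then TABLE_alt.getD b.toNat [] else [Char.ofNat b.toNat])).flatten)

-- ===== PRECONDITION & SPEC =====
-- Pre_ excludes the inputs where A raises (an element that is negative or ≥ 0x110000 →
-- ValueError in chr, an element equal to 255 → the "~" remap then chr("~") TypeError) and
-- the elements in the surrogate range 0xD800–0xDFFF, on which A returns a lone-surrogate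
-- Python str that has no Lean String counterpart (B returns the same str there).
def Pre_scan_codes (binary : List Int) : Prop :=
  ∀ b ∈ binary, 0 ≤ b ∧ b ≠ 255 ∧ (b < 55296 ∨ (57343 < b ∧ b < 1114112))
instance (binary : List Int) : Decidable (Pre_scan_codes binary) := by
  unfold Pre_scan_codes; infer_instance

def pvWitness_scan_codes : List Int := [65, 2, 224, 164, 300]

def Spec_scan_codes (binary : List Int) (out : String) : Prop := out = scan_codes_alt binary
instance (binary : List Int) (out : String) : Decidable (Spec_scan_codes binary out) := by
  unfold Spec_scan_codes; infer_instance

-- ===== CLAIM (what is proved, stated in full; the proofs are below) =====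
def Claim_equal_scan_codes : Prop := ∀ (binary : List Int), Dom_scan_codes binary → Pre_scan_codes binary → Spec_scan_codes binary (scan_codes binary)

-- ===== LEMMAS AND PROOFS =====

-- the character A's pet2ascii produces for one admitted element
def pvCharA (char : Int) : Char :=
  let char : Int :=
    if 128 + 64 < char ∧ char < 128 + 91 then char - 128
    else if 96 - 32 < char ∧ char < 123 - 32 then char + 32
    else if 192 - 128 < char ∧ char < 219 - 128 then char + 128
    else char
  let char : Int :=
    match PET_REMAP.get? char with
    | some s => ((s.toList.headD ' ').toNat : Int)
    | none => char
  Char.ofNat char.toNat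

-- the text A's scan loop appends for one character
def pvEmitA (char : Char) : List Char :=
  let byte : Int := (char.toNat : Int)
  if (0xE0 ≤ byte ∧ byte ≤ 0xF8) ∨ (1 < byte ∧ byte < 4) then
    match MTEXT.get? byte with
    | some param => param.toList
    | none => []
  else [char]

-- the piece B contributes for one element
def pvPieceB (b : Int) : List Char :=
  if 0 ≤ b ∧ b < 256 then TABLE_alt.getD b.toNat [] else [Char.ofNat b.toNat]

theorem pet2ascii_eq_map (petscii : List Int) : pet2ascii petscii = petscii.map pvCharA := by
  have h := PySem.List.foldl_append_singleton_eq_map pvCharA petscii []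
  simpa [pet2ascii, pvCharA] using h

theorem scan_codes_eq_flatMap (binary : List Int) :
    scan_codes binary = String.mk ((pet2ascii binary).flatMap pvEmitA) := by
  have hfun : (fun (content : List Char) (char : Char) =>
      let byte : Int := (char.toNat : Int)
      if (0xE0 ≤ byte ∧ byte ≤ 0xF8) ∨ (1 < byte ∧ byte < 4) then
        match MTEXT.get? byte with
        | some param => content ++ param.toList
        | none => content
      else content ++ [char]) = fun content char => content ++ pvEmitA char := by
    funext content char
    simp only [pvEmitA]
    split
    all_goals try rfl
    all_goals cases MTEXT.get? ((char.toNat : Int)) <;> simp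
  simp only [scan_codes, hfun, PySem.List.foldl_append_eq_flatMap, List.nil_append]

theorem alt_eq_flatMap (binary : List Int) :
    scan_codes_alt binary = String.mk (binary.flatMap pvPieceB) := by
  unfold scan_codes_alt
  rw [List.flatMap_def]
  rfl

-- elementwise agreement on 0 ≤ b < 256 (including 255: both ports fall through there)
set_option maxRecDepth 40000 in
theorem piece_small : ∀ n ∈ List.range 256, pvEmitA (pvCharA (n : Int)) = pvPieceB (n : Int) := by
  decide

-- elementwise agreement for 256 ≤ b on valid non-surrogate scalars
theorem piece_large (b : Int) (h256 : 256 ≤ b) (hv : b < 55296 ∨ (57343 < b ∧ b < 1114112)) :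
    pvEmitA (pvCharA b) = pvPieceB b := by
  have hA : pvCharA b = Char.ofNat b.toNat := by
    unfold pvCharA
    have h1 : ¬(128 + 64 < b ∧ b < 128 + 91) := by omega
    have h2 : ¬(96 - 32 < b ∧ b < 123 - 32) := by omega
    have h3 : ¬(192 - 128 < b ∧ b < 219 - 128) := by omega
    simp only [if_neg h1, if_neg h2, if_neg h3]
    have hP : PET_REMAP = ⟨[((164 : Int), "_"), (13, "\n")]⟩ := by decide
    have : PET_REMAP.get? b = none := by
      rw [hP]
      simp [PySem.Dict.get?,
        show ¬((164 : Int) == b) from by simp; omega,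
        show ¬((13 : Int) == b) from by simp; omega]
    rw [this]
  have hvalid : (b.toNat).isValidChar := by
    unfold Nat.isValidChar
    omega
  have htn : (Char.ofNat b.toNat).toNat = b.toNat := by
    rw [Char.toNat_ofNat]; simp [hvalid]
  rw [hA]
  have hbt : ((b.toNat : Nat) : Int) = b := by omega
  have h5 : ¬(((0xE0 : Int) ≤ b ∧ b ≤ 0xF8) ∨ (1 < b ∧ b < 4)) := by omega
  have h6 : ¬((0 : Int) ≤ b ∧ b < 256) := by omega
  simp only [pvEmitA, pvPieceB, htn, hbt, if_neg h5, if_neg h6]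

theorem piece_eq (b : Int) (hb : 0 ≤ b ∧ (b < 55296 ∨ (57343 < b ∧ b < 1114112))) :
    pvEmitA (pvCharA b) = pvPieceB b := by
  rcases lt_or_ge b 256 with h | h
  · have hn : b = ((b.toNat : Nat) : Int) := by omega
    have hmem : b.toNat ∈ List.range 256 := by
      rw [List.mem_range]; omega
    rw [hn]; exact piece_small b.toNat hmem
  · exact piece_large b h hb.2

-- ===== VERDICT (by name: the statement is the Claim_ definition above) =====
theorem scan_codes_spec : Claim_equal_scan_codes := by
  intro binary _hdom hpre
  unfold Spec_scan_codes
  rw [scan_codes_eq_flatMap, alt_eq_flatMap, pet2ascii_eq_map]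
  congr 1
  rw [List.flatMap_def, List.flatMap_def, List.map_map]
  congr 1
  apply List.map_congr_left
  intro b hbmem
  have hb := hpre b hbmem
  exact piece_eq b ⟨hb.1, hb.2.2⟩
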